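-- pv_equiv track=rewrite | github.com/stay-out-of-it/Codility | Challenges/Carol_of_the_Code.py | solution
-- ===== SOURCE A (Python) =====
-- def get_rotate_count_first(l, word):
--     q = (1, 0, 1, 2)
--     return q[word.index(l)]
--
-- def get_rotate_count_next(l, word):
--     q = (1, 2, 1, 0)
--     w = (2, -1, 0, 1)
--     return q[word.index(l)], w[word.index(l)]
--
-- def solution(A):
--     """
--     0: WBGR     WBGR    WRGB    WRGB    RBGW
--     1: BGRw     BGRw    RGBw    RGBw    BGWr
--        rWBG     rWBG    bWRG    bWRG    wRBG
--     2: GRwb     GRwb    GBwr    GBwr    GWrb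
--
--     W:
--        rWBG(1)  BGRw(1) rWBG(1) RGBw(1) wRBG(1)  5
--     B:
--        WBGR(0)  GRwb(2) GBwr(2) WRGB(0) BGWr(1)  5
--     G:
--        BGRw(1)  rWBG(1) RGBw(1) bWRG(1) RBGW(0)  4
--     R:
--        GRwb(2)  WBGR(0) WRGB(0) GBwr(2) GWrb(1)  5
--
--     """
--     w = {}
--     for l in "WBGR":
--         c = l
--         counter = get_rotate_count_first(c, A[0])
--         for word in A[1:]:
--             a, index_l = get_rotate_count_next(c, word)
--             counter += a
--             c = word[index_l]
--         w[l] = counter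
--
--     return min(w.values())
-- ===== SOURCE B (Python) =====
-- def solution(A):
--     # Backward dynamic programming: compute, for every possible current letter,
--     # the cost-to-go over the remaining words, then combine with the first-word table.
--     # Base case: with no words left the cost-to-go of any letter is 0 (hence .get(_, 0)).
--     FIRST = (1, 0, 1, 2)
--     COST = (1, 2, 1, 0)
--     NEXT = (2, -1, 0, 1)
--     togo = {}
--     for word in reversed(A[1:]):
--         nt = {}
--         for c in "WBGR":
--             i = word.index(c)
--             nt[c] = COST[i] + togo.get(word[NEXT[i]], 0)
--         togo = nt
--     return min(FIRST[A[0].index(c)] + togo.get(c, 0) for c in "WBGR")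
-- ===== Notes on version B (the rewrite author's own statement) =====
-- stated objective: alternative
-- what changed: A simulates each of the four starting letters forwards over the word list (four forward passes, each tracking one evolving (counter, current-letter) state); B instead computes by backward dynamic programming, over the reversed word list, a cost-to-go table from every possible current letter, and only at the end combines it with the first-word costs.
import Mathlib
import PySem

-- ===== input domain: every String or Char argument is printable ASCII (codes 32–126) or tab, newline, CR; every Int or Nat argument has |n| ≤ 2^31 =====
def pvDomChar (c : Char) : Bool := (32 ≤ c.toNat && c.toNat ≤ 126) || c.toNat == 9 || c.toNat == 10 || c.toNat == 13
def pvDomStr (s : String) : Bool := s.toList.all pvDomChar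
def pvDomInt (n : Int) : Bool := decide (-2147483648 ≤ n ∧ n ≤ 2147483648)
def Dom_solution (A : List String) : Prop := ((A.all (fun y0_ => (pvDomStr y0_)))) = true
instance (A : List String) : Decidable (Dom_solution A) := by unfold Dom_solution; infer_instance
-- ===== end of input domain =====

-- B replaces A's four forward simulations (one per starting letter) by a backward
-- dynamic-programming pass building a cost-to-go table; objective: alternative decomposition.

-- ===== PORT A =====
-- Python raise points (str.index on a missing letter, indexing out of range, A[0] on an
-- empty list, min() of nothing) are defaulted with .getD here; Pre_solution excludes them.
def get_rotate_count_first (l : Char) (word : String) : Int :=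
  let q : List Int := [1, 0, 1, 2]
  (PySem.List.pyGet? q (((PySem.List.index? word.toList l).getD 0 : Nat) : Int)).getD 0

def get_rotate_count_next (l : Char) (word : String) : Int × Int :=
  let q : List Int := [1, 2, 1, 0]
  let w : List Int := [2, -1, 0, 1]
  ((PySem.List.pyGet? q (((PySem.List.index? word.toList l).getD 0 : Nat) : Int)).getD 0,
   (PySem.List.pyGet? w (((PySem.List.index? word.toList l).getD 0 : Nat) : Int)).getD 0)

def solution (A : List String) : Int :=
  let w : PySem.Dict Char Int :=
    "WBGR".toList.foldl (fun (w : PySem.Dict Char Int) l =>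
      let c := l
      let counter := get_rotate_count_first c ((PySem.List.pyGet? A 0).getD "")
      let s := (PySem.List.slice A (some 1) none).foldl
        (fun (s : Int × Char) word =>
          let ai := get_rotate_count_next s.2 word
          (s.1 + ai.1, (PySem.Str.pyGet? word ai.2).getD s.2))
        (counter, c)
      w.insert l s.1) PySem.Dict.empty
  (PySem.List.min? w.values (fun x => x)).getD 0

-- ===== PORT B =====
-- Python raise points (str.index on a missing letter) are defaulted with .getD;
-- Pre_solution excludes the inputs reaching them.  togo.get(x, 0) is Dict.getD.
def solution_alt (A : List String) : Int :=
  let FIRST : List Int := [1, 0, 1, 2]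
  let COST : List Int := [1, 2, 1, 0]
  let NEXT : List Int := [2, -1, 0, 1]
  let togo0 : PySem.Dict Char Int := PySem.Dict.empty
  let togo := (PySem.List.slice A (some 1) none).reverse.foldl
    (fun (togo : PySem.Dict Char Int) word =>
      "WBGR".toList.foldl (fun nt c =>
        let i : Int := ((PySem.List.index? word.toList c).getD 0 : Nat)
        nt.insert c ((PySem.List.pyGet? COST i).getD 0
          + togo.getD ((PySem.Str.pyGet? word ((PySem.List.pyGet? NEXT i).getD 0)).getD c) 0))
        PySem.Dict.empty)
    togo0
  (PySem.List.min? ("WBGR".toList.map (fun c =>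
      (PySem.List.pyGet? FIRST
        (((PySem.List.index? ((PySem.List.pyGet? A 0).getD "").toList c).getD 0 : Nat) : Int)).getD 0
      + togo.getD c 0)) (fun x => x)).getD 0

-- ===== PRECONDITION & SPEC =====
-- Pre_ excludes the empty list, lists with a word that does not start with a permutation of
-- "WBGR", and lists with a middle word whose last character is outside "WBGR": on most such
-- inputs A raises (str.index ValueError / tuple IndexError), and on the few where A still
-- returns (a stray current letter that a later word happens to resolve) the chain leaves the
-- four tabulated letters, where the two dict conventions are both accidental.
def Pre_solution (A : List String) : Prop :=
  A ≠ [] ∧ (∀ s ∈ A, ((s.toList.take 4).Perm ['W', 'B', 'G', 'R'])) ∧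
    ∀ s ∈ A.tail.dropLast, s.toList.getLast?.getD 'W' ∈ (['W', 'B', 'G', 'R'] : List Char)
instance (A : List String) : Decidable (Pre_solution A) := by unfold Pre_solution; infer_instance

def pvWitness_solution : List String := ["WBGR"]

def Spec_solution (A : List String) (out : Int) : Prop := out = solution_alt A
instance (A : List String) (out : Int) : Decidable (Spec_solution A out) := by unfold Spec_solution; infer_instance

-- ===== CLAIM (what is proved, stated in full; the proofs are below) =====
def Claim_equal_solution : Prop := ∀ (A : List String), Dom_solution A → Pre_solution A → Spec_solution A (solution A)

-- ===== LEMMAS AND PROOFS =====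

-- proof-side names for the per-word cost / next-letter expressions shared by both ports
def pvCost (word : String) (c : Char) : Int :=
  (PySem.List.pyGet? ([1, 2, 1, 0] : List Int)
    (((PySem.List.index? word.toList c).getD 0 : Nat) : Int)).getD 0

def pvNext (word : String) (c : Char) : Char :=
  (PySem.Str.pyGet? word
    ((PySem.List.pyGet? ([2, -1, 0, 1] : List Int)
      (((PySem.List.index? word.toList c).getD 0 : Nat) : Int)).getD 0)).getD c

-- cost-to-go of the remaining words from current letter c (the value B tabulates)
def pvG : List String → Char → Int
  | [], _ => 0
  | w :: ws, c => pvCost w c + pvG ws (pvNext w c)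

-- A's forward fold equals its start counter plus the cost-to-go
lemma foldA_eq_pvG (ws : List String) (counter : Int) (c : Char) :
    (ws.foldl (fun (s : Int × Char) word =>
        let ai := get_rotate_count_next s.2 word
        (s.1 + ai.1, (PySem.Str.pyGet? word ai.2).getD s.2)) (counter, c)).1
      = counter + pvG ws c := by
  induction ws generalizing counter c with
  | nil => simp [pvG]
  | cons w ws ih =>
      simp only [List.foldl_cons]
      exact (ih _ _).trans (by simp only [pvG, get_rotate_count_next, pvCost, pvNext]; ring)

-- a letter of "WBGR" occurs in a permutation of it, and the next letter stays in "WBGR"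
lemma pvNext_mem (word : String) (c : Char)
    (hp : (word.toList.take 4).Perm ['W', 'B', 'G', 'R'])
    (hlast : word.toList.getLast?.getD 'W' ∈ (['W', 'B', 'G', 'R'] : List Char))
    (hc : c ∈ (['W', 'B', 'G', 'R'] : List Char)) :
    pvNext word c ∈ (['W', 'B', 'G', 'R'] : List Char) := by
  have hlen : 4 ≤ word.length := by
    have := hp.length_eq
    simp [List.length_take] at this
    omega
  have hlen' : 4 ≤ word.toList.length := by simpa using hlen
  have hmem4 : ∀ (j : Nat) (hj : j < 4),
      word.toList[j]'(by omega) ∈ (['W', 'B', 'G', 'R'] : List Char) := by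
    intro j hj
    have : word.toList[j]'(by omega) ∈ word.toList.take 4 := by
      rw [List.mem_take_iff_getElem]
      exact ⟨j, by simp; omega, by simp⟩
    exact hp.mem_iff.mp this
  have hcw : c ∈ word.toList := by
    have : c ∈ word.toList.take 4 := hp.mem_iff.mpr hc
    exact List.mem_of_mem_take this
  obtain ⟨i, hi⟩ := (PySem.List.index?_isSome_iff (xs := word.toList) (v := c)).2 hcw
      |> Option.isSome_iff_exists.mp
  obtain ⟨hk, hic, hfirst⟩ := PySem.List.getElem_of_index?_eq_some hi
  -- the first occurrence of c lies in the first four characters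
  have hi4 : i < 4 := by
    by_contra hge
    obtain ⟨j, hj4, hjc⟩ : ∃ j, ∃ (hj : j < 4), word.toList[j]'(by omega) = c := by
      have : c ∈ word.toList.take 4 := hp.mem_iff.mpr hc
      rw [List.mem_take_iff_getElem] at this
      obtain ⟨j, hj, hjc⟩ := this
      exact ⟨j, by omega, hjc⟩
    exact hfirst j (by omega) hjc
  have hlast' : word.toList.getLast? = some (word.toList[word.toList.length - 1]'(by omega)) := by
    rw [List.getLast?_eq_getElem?, List.getElem?_eq_getElem (by omega)]
  unfold pvNext
  rw [hi]
  have hstr : ∀ (j : Int), PySem.Str.pyGet? word j = PySem.List.pyGet? word.toList j := by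
    intro j; simp
  interval_cases i
  · -- word.index(c) = 0: next letter is word[2]
    simp only [Option.getD_some, Nat.cast_zero, hstr]
    rw [show PySem.List.pyGet? ([2, -1, 0, 1] : List Int) 0 = some 2 from by decide,
      Option.getD_some, show (2 : Int) = ((2 : Nat) : Int) from rfl, PySem.List.pyGet?_natCast,
      List.getElem?_eq_getElem (by omega), Option.getD_some]
    exact hmem4 2 (by omega)
  · -- word.index(c) = 1: next letter is word[-1], the last character
    simp only [Option.getD_some, Nat.cast_one, hstr]
    rw [show PySem.List.pyGet? ([2, -1, 0, 1] : List Int) 1 = some (-1) from by decide,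
      Option.getD_some, PySem.List.pyGet?_neg_one, hlast']
    simpa [hlast'] using hlast
  · -- word.index(c) = 2: next letter is word[0]
    simp only [Option.getD_some, Nat.cast_ofNat, hstr]
    rw [show PySem.List.pyGet? ([2, -1, 0, 1] : List Int) 2 = some 0 from by decide,
      Option.getD_some, show (0 : Int) = ((0 : Nat) : Int) from rfl, PySem.List.pyGet?_natCast,
      List.getElem?_eq_getElem (by omega), Option.getD_some]
    exact hmem4 0 (by omega)
  · -- word.index(c) = 3: next letter is word[1]
    simp only [Option.getD_some, Nat.cast_ofNat, hstr]
    rw [show PySem.List.pyGet? ([2, -1, 0, 1] : List Int) 3 = some 1 from by decide,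
      Option.getD_some, show (1 : Int) = ((1 : Nat) : Int) from rfl, PySem.List.pyGet?_natCast,
      List.getElem?_eq_getElem (by omega), Option.getD_some]
    exact hmem4 1 (by omega)

-- B's inner loop over "WBGR" builds the table c ↦ pvCost w c + togo.getD (pvNext w c) 0
lemma step_getD (w : String) (togo : PySem.Dict Char Int) (c : Char)
    (hc : c ∈ (['W', 'B', 'G', 'R'] : List Char)) :
    (("WBGR".toList.foldl (fun nt c =>
        let i : Int := ((PySem.List.index? w.toList c).getD 0 : Nat)
        nt.insert c ((PySem.List.pyGet? ([1, 2, 1, 0] : List Int) i).getD 0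
          + togo.getD ((PySem.Str.pyGet? w
              ((PySem.List.pyGet? ([2, -1, 0, 1] : List Int) i).getD 0)).getD c) 0))
      PySem.Dict.empty) : PySem.Dict Char Int).getD c 0
      = pvCost w c + togo.getD (pvNext w c) 0 := by
  have : "WBGR".toList = ['W', 'B', 'G', 'R'] := by decide
  fin_cases hc <;>
    simp [this, List.foldl_cons, PySem.Dict.getD_insert, pvCost, pvNext]

-- the backward fold tabulates pvG for every letter of "WBGR"
lemma togo_getD (ws : List String) (c : Char)
    (hws : ∀ s ∈ ws, (s.toList.take 4).Perm ['W', 'B', 'G', 'R'])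
    (hmid : ∀ s ∈ ws.dropLast, s.toList.getLast?.getD 'W' ∈ (['W', 'B', 'G', 'R'] : List Char))
    (hc : c ∈ (['W', 'B', 'G', 'R'] : List Char)) :
    (ws.reverse.foldl
      (fun (togo : PySem.Dict Char Int) word =>
        "WBGR".toList.foldl (fun nt c =>
          let i : Int := ((PySem.List.index? word.toList c).getD 0 : Nat)
          nt.insert c ((PySem.List.pyGet? ([1, 2, 1, 0] : List Int) i).getD 0
            + togo.getD ((PySem.Str.pyGet? word
                ((PySem.List.pyGet? ([2, -1, 0, 1] : List Int) i).getD 0)).getD c) 0))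
          PySem.Dict.empty)
      PySem.Dict.empty).getD c 0
      = pvG ws c := by
  induction ws generalizing c with
  | nil => simp [pvG, PySem.Dict.getD_empty]
  | cons w ws ih =>
      rw [List.reverse_cons, List.foldl_append, List.foldl_cons, List.foldl_nil]
      rw [step_getD w _ c hc]
      cases ws with
      | nil =>
          simp [pvG, PySem.Dict.getD_empty]
      | cons w' ws' =>
          have hw := hws w (by simp)
          have hlastw : w.toList.getLast?.getD 'W' ∈ (['W', 'B', 'G', 'R'] : List Char) :=
            hmid w (by simp [List.dropLast])
          have hws' : ∀ s ∈ w' :: ws', (s.toList.take 4).Perm ['W', 'B', 'G', 'R'] :=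
            fun s hs => hws s (by simp [hs])
          have hmid' : ∀ s ∈ (w' :: ws').dropLast,
              s.toList.getLast?.getD 'W' ∈ (['W', 'B', 'G', 'R'] : List Char) :=
            fun s hs => hmid s (by simp [List.dropLast, hs])
          rw [ih (pvNext w c) hws' hmid' (pvNext_mem w c hw hlastw hc)]
          rfl

-- ===== VERDICT (by name: the statement is the Claim_ definition above) =====
theorem solution_spec : Claim_equal_solution := by
  intro A _ hpre
  obtain ⟨-, hall, hmid⟩ := hpre
  have hs1 : PySem.List.slice A (some 1) none = A.tail := PySem.List.slice_from_one A
  have hsl : ∀ s ∈ PySem.List.slice A (some 1) none, (s.toList.take 4).Perm ['W', 'B', 'G', 'R'] := by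
    rw [hs1]; exact fun s hs => hall s (List.mem_of_mem_tail hs)
  have hsm : ∀ s ∈ (PySem.List.slice A (some 1) none).dropLast,
      s.toList.getLast?.getD 'W' ∈ (['W', 'B', 'G', 'R'] : List Char) := by
    rw [hs1]; exact hmid
  have hW : "WBGR".toList = ['W', 'B', 'G', 'R'] := by decide
  have htW := togo_getD (PySem.List.slice A (some 1) none) 'W' hsl hsm (by decide)
  have htB := togo_getD (PySem.List.slice A (some 1) none) 'B' hsl hsm (by decide)
  have htG := togo_getD (PySem.List.slice A (some 1) none) 'G' hsl hsm (by decide)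
  have htR := togo_getD (PySem.List.slice A (some 1) none) 'R' hsl hsm (by decide)
  unfold Spec_solution solution solution_alt
  simp only [foldA_eq_pvG]
  simp only [hW, List.foldl_cons, List.foldl_nil, List.map_cons, List.map_nil] at htW htB htG htR ⊢
  rw [htW, htB, htG, htR]
  simp [get_rotate_count_first, PySem.Dict.empty, PySem.Dict.insert, PySem.Dict.values,
    PySem.Dict.contains]
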